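-- pv_equiv track=rewrite | github.com/manas-17045/LeetcodeSolutions | Leetcode 2401-2500/2499/2499-1.py | minimumTotalCost
-- ===== SOURCE A (Python) =====
-- import collections
--
-- def minimumTotalCost(nums1: list[int], nums2: list[int]) -> int:
--     """
--     Calculates the minimum total cost to make arrays unequal.
--
--     Args:
--         nums1: The first list of integers.
--         nums2: The second list of integers.
--     Returns:
--         The minimum total cost to make arrays unequal, or -1 if it's impossible.
--     """
--     n = len(nums1)
--     totalCost = 0
--     numSame = 0
--     freqMap = collections.Counter()
--     isSame = [False] * n
--
--     for i in range(n):
--         if nums1[i] == nums2[i]: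
--             totalCost += i
--             numSame += 1
--             val = nums1[i]
--             freqMap[val] += 1
--             isSame[i] = True
--
--     if numSame == 0:
--         return 0
--
--     dominantValue, maxFreq = freqMap.most_common(1)[0]
--
--     swapsToFind = 0
--     if maxFreq > numSame / 2:
--         swapsToFind = 2 * maxFreq - numSame
--
--     if swapsToFind == 0:
--         return totalCost
--
--     for j in range(n):
--         if swapsToFind == 0:
--             break
--
--         if not isSame[j] and nums1[j] != dominantValue and nums2[j] != dominantValue:
--             totalCost += j
--             swapsToFind -= 1
--
--     if swapsToFind > 0:
--         return -1
--
--     return totalCost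
-- ===== SOURCE B (Python) =====
-- def minimumTotalCost(nums1: list[int], nums2: list[int]) -> int:
--     # Boyer-Moore majority vote over the same-index values: no frequency map.
--     totalCost = 0
--     numSame = 0
--     cand = 0
--     cnt = 0
--     for i, (a, b) in enumerate(zip(nums1, nums2)):
--         if a == b:
--             totalCost += i
--             numSame += 1
--             if cnt == 0:
--                 cand, cnt = a, 1
--             elif a == cand:
--                 cnt += 1
--             else:
--                 cnt -= 1
--     if numSame == 0:
--         return 0
--     # verification pass: true frequency of the candidate
--     occ = sum(1 for a, b in zip(nums1, nums2) if a == b and a == cand)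
--     if 2 * occ <= numSame:
--         return totalCost
--     swapsToFind = 2 * occ - numSame
--     for j, (a, b) in enumerate(zip(nums1, nums2)):
--         if swapsToFind == 0:
--             break
--         if a != b and a != cand and b != cand:
--             totalCost += j
--             swapsToFind -= 1
--     return -1 if swapsToFind > 0 else totalCost
-- ===== Notes on version B (the rewrite author's own statement) =====
-- stated objective: alternative
-- what changed: Replaces A's Counter/most_common frequency map by a Boyer-Moore majority vote plus a verification counting pass, iterates with enumerate(zip(...)) instead of indexing by range(n), and drops the isSame array.
import Mathlib
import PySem

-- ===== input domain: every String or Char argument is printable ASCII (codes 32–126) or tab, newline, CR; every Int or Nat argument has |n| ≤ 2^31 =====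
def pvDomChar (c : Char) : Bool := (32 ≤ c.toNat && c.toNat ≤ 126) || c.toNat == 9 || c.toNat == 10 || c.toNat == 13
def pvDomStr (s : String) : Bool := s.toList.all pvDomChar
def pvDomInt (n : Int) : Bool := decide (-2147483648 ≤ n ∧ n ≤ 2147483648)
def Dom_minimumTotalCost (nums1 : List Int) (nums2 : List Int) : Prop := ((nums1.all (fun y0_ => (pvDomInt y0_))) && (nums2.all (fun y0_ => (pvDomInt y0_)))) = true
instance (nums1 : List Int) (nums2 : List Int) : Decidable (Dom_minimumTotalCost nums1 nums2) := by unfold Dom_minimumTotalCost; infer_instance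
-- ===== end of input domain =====

-- B replaces A's Counter/most_common majority detection by a Boyer–Moore majority vote with a
-- verification pass (alternative algorithm, no frequency map); same return value on all of Pre_.

-- ===== PORT A =====
-- literal port of A; `maxFreq > numSame / 2` is ported as `2 * maxFreq > numSame`,
-- exact here because both sides are integers (the float division numSame/2 is exact below 2^53).
def minimumTotalCost (nums1 : List Int) (nums2 : List Int) : Int :=
  let n := nums1.length
  let st := (PySem.List.pyRange 0 n 1).foldl
    (fun (st : Int × Int × PySem.Dict Int Int × List Bool) i =>
      if PySem.List.pyGetD nums1 i 0 = PySem.List.pyGetD nums2 i 0 then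
        (st.1 + i, st.2.1 + 1,
         st.2.2.1.modify (PySem.List.pyGetD nums1 i 0) 0 (· + 1),
         PySem.List.pySetD st.2.2.2 i true)
      else st)
    (0, 0, PySem.Dict.empty, List.replicate n false)
  if st.2.1 = 0 then 0
  else
    match PySem.List.max? st.2.2.1.items (fun p => p.2) with
    | none => 0   -- unreachable: numSame ≠ 0 makes freqMap nonempty, so most_common(1)[0] exists
    | some dm =>
      let swapsToFind := if 2 * dm.2 > st.2.1 then 2 * dm.2 - st.2.1 else 0
      if swapsToFind = 0 then st.1
      else
        let st2 := (PySem.List.pyRange 0 n 1).foldl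
          (fun (q : Int × Int) j =>
            if q.2 = 0 then q
            else if PySem.List.pyGetD st.2.2.2 j false = false ∧
                    PySem.List.pyGetD nums1 j 0 ≠ dm.1 ∧ PySem.List.pyGetD nums2 j 0 ≠ dm.1 then
              (q.1 + j, q.2 - 1)
            else q)
          (st.1, swapsToFind)
        if st2.2 > 0 then -1 else st2.1

-- ===== PORT B =====
-- one Boyer–Moore vote step (the inner if/elif/else of B's first loop)
def bmStep (st : Int × Int) (a : Int) : Int × Int :=
  if st.2 = 0 then (a, 1)
  else if a = st.1 then (st.1, st.2 + 1)
  else (st.1, st.2 - 1)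

def minimumTotalCost_alt (nums1 : List Int) (nums2 : List Int) : Int :=
  let pairs := nums1.zip nums2
  let st := (PySem.List.enumerate pairs 0).foldl
    (fun (st : Int × Int × Int × Int) p =>
      if p.2.1 = p.2.2 then (st.1 + p.1, st.2.1 + 1, bmStep st.2.2 p.2.1)
      else st)
    (0, 0, 0, 0)
  if st.2.1 = 0 then 0
  else
    let occ : Int := ((pairs.filter (fun q => q.1 == q.2 && q.1 == st.2.2.1)).map (fun _ => (1 : Int))).sum
    if 2 * occ ≤ st.2.1 then st.1
    else
      let st2 := (PySem.List.enumerate pairs 0).foldl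
        (fun (q : Int × Int) p =>
          if q.2 = 0 then q
          else if p.2.1 ≠ p.2.2 ∧ p.2.1 ≠ st.2.2.1 ∧ p.2.2 ≠ st.2.2.1 then (q.1 + p.1, q.2 - 1)
          else q)
        (st.1, 2 * occ - st.2.1)
      if st2.2 > 0 then -1 else st2.1

-- ===== PRECONDITION & SPEC =====
-- A indexes nums2 by every i < len(nums1), so it raises IndexError when nums2 is shorter; only that is excluded.
def Pre_minimumTotalCost (nums1 : List Int) (nums2 : List Int) : Prop :=
  nums1.length ≤ nums2.length
instance (nums1 : List Int) (nums2 : List Int) : Decidable (Pre_minimumTotalCost nums1 nums2) := by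
  unfold Pre_minimumTotalCost; infer_instance

def pvWitness_minimumTotalCost : List Int × List Int := ([1, 1, 2], [1, 1, 3])

def Spec_minimumTotalCost (nums1 : List Int) (nums2 : List Int) (out : Int) : Prop := out = minimumTotalCost_alt nums1 nums2
instance (nums1 : List Int) (nums2 : List Int) (out : Int) : Decidable (Spec_minimumTotalCost nums1 nums2 out) := by unfold Spec_minimumTotalCost; infer_instance

-- ===== CLAIM (what is proved, stated in full; the proofs are below) =====
def Claim_equal_minimumTotalCost : Prop := ∀ (nums1 : List Int) (nums2 : List Int), Dom_minimumTotalCost nums1 nums2 → Pre_minimumTotalCost nums1 nums2 → Spec_minimumTotalCost nums1 nums2 (minimumTotalCost nums1 nums2)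



-- ===== LEMMAS AND PROOFS =====

-- proof-only helpers: the two first-pass loop bodies and the (shared) second-pass body,
-- as functions over one enumerated pair p = (index, (a, b))
def pvStepA (st : Int × Int × PySem.Dict Int Int × List Bool) (p : Int × Int × Int) :
    Int × Int × PySem.Dict Int Int × List Bool :=
  if p.2.1 = p.2.2 then
    (st.1 + p.1, st.2.1 + 1, st.2.2.1.modify p.2.1 0 (· + 1), PySem.List.pySetD st.2.2.2 p.1 true)
  else st

def pvStepB (st : Int × Int × Int × Int) (p : Int × Int × Int) : Int × Int × Int × Int :=
  if p.2.1 = p.2.2 then (st.1 + p.1, st.2.1 + 1, bmStep st.2.2 p.2.1) else st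

def pvStep2 (dom : Int) (q : Int × Int) (p : Int × Int × Int) : Int × Int :=
  if q.2 = 0 then q
  else if p.2.1 ≠ p.2.2 ∧ p.2.1 ≠ dom ∧ p.2.2 ≠ dom then (q.1 + p.1, q.2 - 1) else q

-- the cost sum and the list of same-position values, as closed expressions
def pvSum (l : List (Int × Int)) (k : Int) : Int :=
  (((PySem.List.enumerate l k).filter (fun p => p.2.1 == p.2.2)).map (fun p => p.1)).sum

def pvVals (l : List (Int × Int)) : List Int :=
  (l.filter (fun q => q.1 == q.2)).map (fun q => q.1)

lemma pvSum_cons (a b : Int) (t : List (Int × Int)) (k : Int) :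
    pvSum ((a, b) :: t) k = (if a = b then k else 0) + pvSum t (k + 1) := by
  simp [pvSum, PySem.List.enumerate_cons, List.filter_cons]
  by_cases hab : a = b <;> simp [hab]

lemma pvVals_cons (a b : Int) (t : List (Int × Int)) :
    pvVals ((a, b) :: t) = (if a = b then [a] else []) ++ pvVals t := by
  simp [pvVals, List.filter_cons]
  by_cases hab : a = b <;> simp [hab]

-- a fold over enumerate(pairs) is the range-indexed fold A runs
lemma pv_foldE {σ : Type} (pairs : List (Int × Int)) (f : σ → Int × Int × Int → σ) (init : σ) :
    (PySem.List.enumerate pairs 0).foldl f init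
      = (PySem.List.pyRange 0 (PySem.List.len pairs) 1).foldl
          (fun st j => f st (j, PySem.List.pyGetD pairs j (0, 0))) init := by
  rw [PySem.List.enumerate_eq_map_pyRange pairs (0, 0), List.foldl_map]

lemma pv_getD_zip (nums1 nums2 : List Int) (j : Int) (h : nums1.length ≤ nums2.length)
    (h0 : 0 ≤ j) (h1 : j < (nums1.length : Int)) :
    PySem.List.pyGetD (nums1.zip nums2) j (0, 0)
      = (PySem.List.pyGetD nums1 j 0, PySem.List.pyGetD nums2 j 0) := by
  have hz : (nums1.zip nums2).length = nums1.length := by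
    simp [List.length_zip]; omega
  rw [PySem.List.pyGetD_eq_getElem (nums1.zip nums2) (0, 0) h0 (by rw [hz]; exact_mod_cast h1),
      PySem.List.pyGetD_eq_getElem nums1 0 h0 h1,
      PySem.List.pyGetD_eq_getElem nums2 0 h0 (by omega)]
  simp [List.getElem_zip]

-- characterization of A's first pass
lemma pv_passA (l : List (Int × Int)) : ∀ (k : Nat) (tc ns : Int) (fm : PySem.Dict Int Int)
    (pre : List Bool), pre.length = k →
    (PySem.List.enumerate l (k : Int)).foldl pvStepA (tc, ns, fm, pre ++ List.replicate l.length false)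
      = (tc + pvSum l k, ns + ((pvVals l).length : Int),
         (pvVals l).foldl (fun d x => d.modify x 0 (· + 1)) fm,
         pre ++ l.map (fun q => q.1 == q.2)) := by
  induction l with
  | nil => intro k tc ns fm pre hk; simp [PySem.List.enumerate_nil, pvSum, pvVals]
  | cons q t ih =>
    intro k tc ns fm pre hk
    obtain ⟨a, b⟩ := q
    rw [PySem.List.enumerate_cons, List.foldl_cons]
    have hcast : ((k : Int)) + 1 = ((k + 1 : Nat) : Int) := by omega
    by_cases hab : a = b
    · have hstep : pvStepA (tc, ns, fm, pre ++ List.replicate ((a, b) :: t).length false) ((k : Int), a, b)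
          = (tc + k, ns + 1, fm.modify a 0 (· + 1),
             (pre ++ [true]) ++ List.replicate t.length false) := by
        simp only [pvStepA, hab, List.length_cons, List.replicate_succ,
          PySem.List.pySetD_natCast, if_pos]
        rw [← hk, List.set_append_right _ _ (le_refl pre.length)]
        simp
      rw [hstep, hcast, ih (k + 1) (tc + k) (ns + 1) (fm.modify a 0 (· + 1)) (pre ++ [true]) (by simp [hk])]
      simp [pvSum_cons, pvVals_cons, hab, Prod.ext_iff, List.append_assoc]
      repeat' apply And.intro
      all_goals ring
    · have hstep : pvStepA (tc, ns, fm, pre ++ List.replicate ((a, b) :: t).length false) ((k : Int), a, b)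
          = (tc, ns, fm, (pre ++ [false]) ++ List.replicate t.length false) := by
        simp [pvStepA, hab, List.replicate_succ]
      rw [hstep, hcast, ih (k + 1) tc ns fm (pre ++ [false]) (by simp [hk])]
      simp [pvSum_cons, pvVals_cons, hab, Prod.ext_iff, List.append_assoc]


-- characterization of B's first pass
lemma pv_passB (l : List (Int × Int)) : ∀ (k : Nat) (tc ns : Int) (cn : Int × Int),
    (PySem.List.enumerate l (k : Int)).foldl pvStepB (tc, ns, cn)
      = (tc + pvSum l k, ns + ((pvVals l).length : Int), (pvVals l).foldl bmStep cn) := by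
  induction l with
  | nil => intro k tc ns cn; simp [PySem.List.enumerate_nil, pvSum, pvVals]
  | cons q t ih =>
    intro k tc ns cn
    obtain ⟨a, b⟩ := q
    rw [PySem.List.enumerate_cons, List.foldl_cons]
    have hcast : ((k : Int)) + 1 = ((k + 1 : Nat) : Int) := by omega
    by_cases hab : a = b
    · have hstep : pvStepB (tc, ns, cn) ((k : Int), a, b) = (tc + k, ns + 1, bmStep cn a) := by
        simp [pvStepB, hab]
      rw [hstep, hcast, ih (k + 1) (tc + k) (ns + 1) (bmStep cn a)]
      simp [pvSum_cons, pvVals_cons, hab, Prod.ext_iff]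
      repeat' apply And.intro
      all_goals ring
    · have hstep : pvStepB (tc, ns, cn) ((k : Int), a, b) = (tc, ns, cn) := by
        simp [pvStepB, hab]
      rw [hstep, hcast, ih (k + 1) tc ns cn]
      simp [pvSum_cons, pvVals_cons, hab]


-- Boyer–Moore majority vote: any strict majority element is the final candidate
lemma pv_bm (l : List Int) : ∀ (c n x : Int), 0 ≤ n →
    2 * ((l.count x : Int) + (if x = c then n else 0)) > (l.length : Int) + n →
    (l.foldl bmStep (c, n)).1 = x := by
  induction l with
  | nil =>
    intro c n x hn hmaj
    simp only [List.foldl_nil]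
    simp only [List.count_nil, List.length_nil, Nat.cast_zero, zero_add] at hmaj
    by_cases hx : x = c
    · exact hx.symm
    · rw [if_neg hx] at hmaj; omega
  | cons a t ih =>
    intro c n x hn hmaj
    rw [List.foldl_cons]
    have hcnt : (List.count x (a :: t) : Int) = (List.count x t : Int) + (if x = a then 1 else 0) := by
      rcases eq_or_ne x a with h | h
      · simp [h]
      · simp [h, Ne.symm h]
    have hlen : (((a :: t) : List Int).length : Int) = (t.length : Int) + 1 := by push_cast [List.length_cons]; ring
    rw [hcnt, hlen] at hmaj
    by_cases h0 : n = 0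
    · subst h0
      rw [show bmStep (c, 0) a = (a, 1) by simp [bmStep]]
      apply ih a 1 x (by omega)
      have hz : (if x = c then (0 : Int) else 0) = 0 := by split <;> rfl
      rw [hz] at hmaj
      by_cases hxa : x = a
      · rw [if_pos hxa] at hmaj ⊢; omega
      · rw [if_neg hxa] at hmaj ⊢; omega
    · by_cases hac : a = c
      · rw [show bmStep (c, n) a = (c, n + 1) by simp [bmStep, h0, hac]]
        apply ih c (n + 1) x (by omega)
        by_cases hxc : x = c
        · have hxa : x = a := by rw [hxc, hac]
          rw [if_pos hxc] at hmaj ⊢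
          rw [if_pos hxa] at hmaj
          omega
        · have hxa : ¬ x = a := fun h => hxc (h.trans hac)
          rw [if_neg hxc] at hmaj ⊢
          rw [if_neg hxa] at hmaj
          omega
      · rw [show bmStep (c, n) a = (c, n - 1) by simp [bmStep, h0, hac]]
        apply ih c (n - 1) x (by omega)
        by_cases hxc : x = c
        · have hxa : ¬ x = a := fun h => hac (h.symm.trans hxc)
          rw [if_pos hxc] at hmaj ⊢
          rw [if_neg hxa] at hmaj
          omega
        · rw [if_neg hxc] at hmaj ⊢
          by_cases hxa : x = a
          · rw [if_pos hxa] at hmaj; omega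
          · rw [if_neg hxa] at hmaj; omega

-- A's loops, rewritten as folds over the enumerated zip (valid under Pre_)
lemma pv_foldA1 (nums1 nums2 : List Int) (h : nums1.length ≤ nums2.length)
    (init : Int × Int × PySem.Dict Int Int × List Bool) :
    (PySem.List.pyRange 0 (nums1.length : Int) 1).foldl
      (fun (st : Int × Int × PySem.Dict Int Int × List Bool) i =>
        if PySem.List.pyGetD nums1 i 0 = PySem.List.pyGetD nums2 i 0 then
          (st.1 + i, st.2.1 + 1, st.2.2.1.modify (PySem.List.pyGetD nums1 i 0) 0 (· + 1),
           PySem.List.pySetD st.2.2.2 i true)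
        else st) init
    = (PySem.List.enumerate (nums1.zip nums2) 0).foldl pvStepA init := by
  rw [pv_foldE]
  have hz : (nums1.zip nums2).length = nums1.length := by simp only [List.length_zip]; omega
  simp only [PySem.List.len_eq, hz]
  apply (PySem.List.foldl_congr_mem _ _ _ _ _).symm
  intro acc j hj
  rw [PySem.List.mem_pyRange_one] at hj
  rw [pv_getD_zip nums1 nums2 j h hj.1 hj.2]
  rfl

lemma pv_foldA2 (nums1 nums2 : List Int) (dom : Int) (h : nums1.length ≤ nums2.length)
    (init : Int × Int) :
    (PySem.List.pyRange 0 (nums1.length : Int) 1).foldl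
      (fun (q : Int × Int) j =>
        if q.2 = 0 then q
        else if PySem.List.pyGetD ((nums1.zip nums2).map (fun p => p.1 == p.2)) j false = false ∧
                PySem.List.pyGetD nums1 j 0 ≠ dom ∧ PySem.List.pyGetD nums2 j 0 ≠ dom then
          (q.1 + j, q.2 - 1)
        else q) init
    = (PySem.List.enumerate (nums1.zip nums2) 0).foldl (pvStep2 dom) init := by
  rw [pv_foldE]
  have hz : (nums1.zip nums2).length = nums1.length := by simp only [List.length_zip]; omega
  simp only [PySem.List.len_eq, hz]
  apply (PySem.List.foldl_congr_mem _ _ _ _ _).symm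
  intro acc j hj
  rw [PySem.List.mem_pyRange_one] at hj
  have e1 : PySem.List.pyGetD nums1 j 0 = nums1[j.toNat]'(by omega) :=
    PySem.List.pyGetD_eq_getElem nums1 0 hj.1 hj.2
  have e2 : PySem.List.pyGetD nums2 j 0 = nums2[j.toNat]'(by omega) :=
    PySem.List.pyGetD_eq_getElem nums2 0 hj.1 (by omega)
  have hmap : PySem.List.pyGetD ((nums1.zip nums2).map (fun p => p.1 == p.2)) j false
      = (nums1[j.toNat]'(by omega) == nums2[j.toNat]'(by omega)) := by
    rw [PySem.List.pyGetD_eq_getElem _ false hj.1 (by simp only [List.length_map]; omega)]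
    simp [List.getElem_zip]
  rw [pv_getD_zip nums1 nums2 j h hj.1 hj.2, hmap, e1, e2]
  simp [pvStep2]

-- B's verification count is the count of the candidate among the same-position values
lemma pv_occ (pairs : List (Int × Int)) (c : Int) :
    ((pairs.filter (fun q => q.1 == q.2 && q.1 == c)).map (fun _ => (1 : Int))).sum
      = ((pvVals pairs).count c : Int) := by
  rw [PySem.List.sum_map_const_int, mul_one]
  congr 1
  rw [← List.countP_eq_length_filter, List.count_eq_countP]
  show _ = List.countP _ ((pairs.filter (fun q => q.1 == q.2)).map (fun q => q.1))
  rw [List.countP_map, List.countP_filter]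
  apply List.countP_congr
  intro x _
  constructor <;> (intro hx; simp at hx ⊢; tauto)

-- ===== VERDICT (by name: the statements are the Claim_ definitions above) =====
theorem minimumTotalCost_spec : Claim_equal_minimumTotalCost := by
  intro nums1 nums2 _ hpre
  have h : nums1.length ≤ nums2.length := hpre
  have hz : (nums1.zip nums2).length = nums1.length := by simp only [List.length_zip]; omega
  unfold Spec_minimumTotalCost
  simp only [minimumTotalCost, minimumTotalCost_alt]
  rw [pv_foldA1 nums1 nums2 h, ← hz]
  have hA := pv_passA (nums1.zip nums2) 0 0 0 PySem.Dict.empty [] rfl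
  simp only [Nat.cast_zero, List.nil_append, zero_add] at hA
  rw [hA]
  have hpb : (fun (st : Int × Int × Int × Int) (p : Int × Int × Int) =>
      if p.2.1 = p.2.2 then (st.1 + p.1, st.2.1 + 1, bmStep st.2.2 p.2.1) else st) = pvStepB := rfl
  rw [hpb]
  have hB := pv_passB (nums1.zip nums2) 0 0 0 (0, 0)
  simp only [Nat.cast_zero, zero_add] at hB
  rw [hB]
  dsimp only
  rw [← PySem.Dict.counter_eq_foldl, PySem.Dict.items_counter]
  set pairs := nums1.zip nums2 with hpairsdef
  set V := pvVals pairs with hVdef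
  set TC := pvSum pairs 0 with hTCdef
  set cand := (V.foldl bmStep (0, 0)).1 with hcanddef
  rw [pv_occ pairs cand]
  by_cases hns : ((V.length : Int)) = 0
  · rw [if_pos hns, if_pos hns]
  · rw [if_neg hns, if_neg hns]
    have hVne : V ≠ [] := by
      intro hnil; apply hns; rw [hnil]; rfl
    obtain ⟨v0, hv0⟩ := List.exists_mem_of_ne_nil V hVne
    cases hmax : PySem.List.max? ((PySem.Set.ofList V).map (fun k => (k, (List.count k V : Int)))) (fun p => p.2) with
    | none =>
      exfalso
      rw [PySem.List.max?_eq_none_iff] at hmax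
      rw [List.map_eq_nil_iff] at hmax
      have : v0 ∈ PySem.Set.ofList V := (PySem.Set.mem_ofList V v0).2 hv0
      rw [hmax] at this
      exact absurd this (List.not_mem_nil)
    | some dm =>
      obtain ⟨k0, hk0, rfl⟩ := List.mem_map.1 (PySem.List.max?_mem hmax)
      have hk0V : k0 ∈ V := (PySem.Set.mem_ofList V k0).1 hk0
      dsimp only
      by_cases hm : 2 * ((List.count k0 V : Int)) > ((V.length : Int))
      · -- k0 is a strict majority: the Boyer–Moore candidate is k0
        have hcand : cand = k0 := by
          rw [hcanddef]
          apply pv_bm V 0 0 k0 le_rfl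
          have hz0 : (if k0 = (0 : Int) then (0 : Int) else 0) = 0 := by split <;> rfl
          rw [hz0]
          omega
        rw [hcand, if_pos hm, if_neg (by omega : ¬ (2 * ((List.count k0 V : Int)) - (V.length : Int) = 0)),
            if_neg (by omega : ¬ (2 * ((List.count k0 V : Int)) ≤ (V.length : Int)))]
        rw [hz, pv_foldA2 nums1 nums2 k0 h]
        rfl
      · -- no strict majority: both sides return the plain total cost
        have hocc : 2 * ((List.count cand V : Int)) ≤ ((V.length : Int)) := by
          by_cases hc : cand ∈ V
          · have hmem : (cand, (List.count cand V : Int)) ∈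
                (PySem.Set.ofList V).map (fun k => (k, (List.count k V : Int))) :=
              List.mem_map.2 ⟨cand, (PySem.Set.mem_ofList V cand).2 hc, rfl⟩
            have := PySem.List.max?_isMax hmax _ hmem
            simp only at this
            omega
          · have : List.count cand V = 0 := List.count_eq_zero.2 hc
            have hlen : 0 ≤ ((V.length : Int)) := Int.natCast_nonneg _
            omega
        rw [if_neg hm, if_pos rfl, if_pos hocc]
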